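-- pv_equiv track=rewrite | github.com/BjarniHaukur/PyGPT | utils/tokenizer.py | replace_pair
-- ===== SOURCE A (Python) =====
-- def replace_pair(ids:list[int], pair:tuple[int,int])->list[int]:
--     new_id = max(ids) + 1
--     new_ids = []
--     i = 0
--     while i < len(ids):
--         if i < len(ids) - 1 and ids[i] == pair[0] and ids[i+1] == pair[1]:
--             new_ids.append(new_id)
--             i += 2 # we accounted for two tokens
--         else:
--             new_ids.append(ids[i])
--             i += 1
--
--     return new_ids
-- ===== SOURCE B (Python) =====
-- def replace_pair(ids: list[int], pair: tuple[int, int]) -> list[int]: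
--     new_id = max(ids) + 1
--     out = []
--     for t in ids:
--         out.append(t)
--         if len(out) >= 2 and out[-2] == pair[0] and out[-1] == pair[1]:
--             out.pop()
--             out.pop()
--             out.append(new_id)
--     return out
-- ===== Notes on version B (the rewrite author's own statement) =====
-- stated objective: alternative
-- what changed: Replaces the index-based while loop with look-ahead match and 2-step skip by a single stack-based pass that pushes each token and collapses the top two elements when they equal the pair (new_id = max+1 can never re-match, so no cascade).
import Mathlib
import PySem

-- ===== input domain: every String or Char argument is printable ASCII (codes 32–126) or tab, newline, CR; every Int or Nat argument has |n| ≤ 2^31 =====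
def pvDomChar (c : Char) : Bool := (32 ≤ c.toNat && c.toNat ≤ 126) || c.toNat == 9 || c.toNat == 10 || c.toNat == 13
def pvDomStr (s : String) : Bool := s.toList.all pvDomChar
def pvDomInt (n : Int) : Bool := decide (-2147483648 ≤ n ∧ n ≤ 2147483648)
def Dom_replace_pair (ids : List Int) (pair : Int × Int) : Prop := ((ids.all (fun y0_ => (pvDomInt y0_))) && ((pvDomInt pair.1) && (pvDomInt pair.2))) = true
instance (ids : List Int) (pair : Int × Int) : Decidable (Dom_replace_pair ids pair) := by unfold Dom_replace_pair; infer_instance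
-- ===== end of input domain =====

-- B replaces A's index-based while loop (look-ahead match, 2-step skip) by a single
-- stack-based pass: push each token, collapse the top two when they equal the pair.
-- Same O(n) cost; different decomposition. Pre_ excludes ids = [] (max([]) raises ValueError in both).


-- ===== PORT A =====
-- the while loop: i and new_ids are the loop state; ids[i]/ids[i+1] via getD (always in range
-- when read, since the branch guards i < len and i < len - 1)
def loopA (ids : List Int) (pair : Int × Int) (new_id : Int) (i : Nat) (acc : List Int) : List Int :=
  if i < ids.length then
    if i < ids.length - 1 ∧ ids.getD i 0 = pair.1 ∧ ids.getD (i+1) 0 = pair.2 then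
      loopA ids pair new_id (i+2) (acc ++ [new_id])
    else
      loopA ids pair new_id (i+1) (acc ++ [ids.getD i 0])
  else acc
termination_by ids.length - i

def replace_pair (ids : List Int) (pair : Int × Int) : List Int :=
  -- max(ids) raises ValueError on []; Pre_ excludes that input
  let new_id := (PySem.List.max? ids (fun x => x)).getD 0 + 1
  loopA ids pair new_id 0 []

-- ===== PORT B =====
-- the loop body: out is kept in reverse (head = Python's out[-1]); push t, then collapse
def loopB (pair : Int × Int) (new_id : Int) (rout : List Int) (t : Int) : List Int :=
  match rout with
  | a :: rest => if a = pair.1 ∧ t = pair.2 then new_id :: rest else t :: a :: rest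
  | [] => [t]

def replace_pair_alt (ids : List Int) (pair : Int × Int) : List Int :=
  let new_id := (PySem.List.max? ids (fun x => x)).getD 0 + 1
  (ids.foldl (loopB pair new_id) []).reverse

-- ===== PRECONDITION & SPEC =====
-- Pre_ excludes only ids = [], where A (and B) raise ValueError at max(ids)
def Pre_replace_pair (ids : List Int) (pair : Int × Int) : Prop := ids ≠ []
instance (ids : List Int) (pair : Int × Int) : Decidable (Pre_replace_pair ids pair) := by unfold Pre_replace_pair; infer_instance
def pvWitness_replace_pair : List Int × (Int × Int) := ([1, 2, 2, 3, 2, 3], (2, 3))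

def Spec_replace_pair (ids : List Int) (pair : Int × Int) (out : List Int) : Prop := out = replace_pair_alt ids pair
instance (ids : List Int) (pair : Int × Int) (out : List Int) : Decidable (Spec_replace_pair ids pair out) := by unfold Spec_replace_pair; infer_instance

-- ===== CLAIM (what is proved, stated in full; the proofs are below) =====
def Claim_equal_replace_pair : Prop := ∀ (ids : List Int) (pair : Int × Int), Dom_replace_pair ids pair → Pre_replace_pair ids pair → Spec_replace_pair ids pair (replace_pair ids pair)

-- ===== LEMMAS AND PROOFS =====

-- canonical recursive form of the replacement (A's greedy left-to-right scan)
def pvSpec (pair : Int × Int) (new_id : Int) : List Int → List Int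
  | a :: b :: rest =>
      if a = pair.1 ∧ b = pair.2 then new_id :: pvSpec pair new_id rest
      else a :: pvSpec pair new_id (b :: rest)
  | l => l

theorem loopA_eq_pvSpec (ids : List Int) (pair : Int × Int) (new_id : Int) :
    ∀ (i : Nat) (acc : List Int), loopA ids pair new_id i acc = acc ++ pvSpec pair new_id (ids.drop i) := by
  intro i
  induction hn : ids.length - i using Nat.strong_induction_on generalizing i with
  | _ n ih =>
    subst hn
    intro acc
    rw [loopA]
    by_cases h : i < ids.length
    · have hdrop : ids.drop i = ids[i] :: ids.drop (i + 1) := List.drop_eq_getElem_cons h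
      have hgd : ids.getD i 0 = ids[i] := by simp [List.getD, List.getElem?_eq_getElem h]
      by_cases h1 : i < ids.length - 1
      · have h1' : i + 1 < ids.length := by omega
        have hdrop1 : ids.drop (i + 1) = ids[i+1] :: ids.drop (i + 2) := List.drop_eq_getElem_cons h1'
        have hgd1 : ids.getD (i+1) 0 = ids[i+1] := by simp [List.getD, List.getElem?_eq_getElem h1']
        by_cases hp : ids[i] = pair.1 ∧ ids[i+1] = pair.2
        · rw [if_pos h, if_pos ⟨h1, by rw [hgd]; exact hp.1, by rw [hgd1]; exact hp.2⟩]
          rw [ih (ids.length - (i+2)) (by omega) (i+2) rfl, hdrop, hdrop1, pvSpec, if_pos hp]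
          simp
        · have hng : ¬ (i < ids.length - 1 ∧ ids.getD i 0 = pair.1 ∧ ids.getD (i+1) 0 = pair.2) := by
            rw [hgd, hgd1]; tauto
          rw [if_pos h, if_neg hng, ih (ids.length - (i+1)) (by omega) (i+1) rfl, hdrop, hdrop1,
            pvSpec, if_neg hp, hgd]
          simp
      · have hdrop1 : ids.drop (i + 1) = [] := List.drop_eq_nil_of_le (by omega)
        rw [if_pos h, if_neg (by tauto), ih (ids.length - (i+1)) (by omega) (i+1) rfl, hdrop,
          hdrop1, hgd]
        simp [pvSpec]
    · rw [if_neg h, List.drop_eq_nil_of_le (by omega)]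
      simp [pvSpec]

-- B's fold equals pvSpec: s is the reversed stack; the hypothesis says the stack top
-- cannot collapse with the next input element, and hlt rules out a cascade on new_id
theorem foldB_eq_pvSpec (pair : Int × Int) (new_id : Int) :
    ∀ (l s : List Int), (∀ x ∈ l, x < new_id) →
      (∀ h t, s.head? = some h → l.head? = some t → ¬(h = pair.1 ∧ t = pair.2)) →
      List.foldl (loopB pair new_id) s l = (pvSpec pair new_id l).reverse ++ s := by
  intro l
  induction hn : l.length using Nat.strong_induction_on generalizing l with
  | _ n ih =>
    subst hn
    match l with
    | [] => intro s _ _; simp [pvSpec]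
    | [a] =>
      intro s hlt hsafe
      have hstep : loopB pair new_id s a = a :: s := by
        match s with
        | [] => rfl
        | h :: rest => simp only [loopB]; rw [if_neg (hsafe h a rfl rfl)]
      simp [hstep, pvSpec]
    | a :: b :: rest =>
      intro s hlt hsafe
      have hstep : loopB pair new_id s a = a :: s := by
        match s with
        | [] => rfl
        | h :: r => simp only [loopB]; rw [if_neg (hsafe h a rfl rfl)]
      simp only [List.foldl_cons, hstep]
      by_cases hp : a = pair.1 ∧ b = pair.2
      · have hstep2 : loopB pair new_id (a :: s) b = new_id :: s := by
          simp only [loopB]; rw [if_pos hp]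
        have hne : new_id ≠ pair.1 := by
          have ha := hlt a (by simp)
          intro he
          rw [← hp.1] at he
          omega
        rw [hstep2,
          ih rest.length (by simp) rest rfl (new_id :: s)
            (fun x hx => hlt x (by simp [hx]))
            (by intro h t hh ht hc; cases hh; exact hne hc.1)]
        rw [pvSpec, if_pos hp]; simp
      · have hstep2 : loopB pair new_id (a :: s) b = b :: a :: s := by
          simp only [loopB]; rw [if_neg hp]
        have hrec := ih (b :: rest).length (by simp) (b :: rest) rfl (a :: s)
          (fun x hx => hlt x (by simp at hx ⊢; tauto))
          (by intro h t hh ht; cases hh; cases ht; exact hp)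
        simp only [List.foldl_cons, hstep2] at hrec ⊢
        rw [hrec, pvSpec, if_neg hp]; simp

-- ===== VERDICT (by name: the statement is the Claim_ definition above) =====
theorem replace_pair_spec : Claim_equal_replace_pair := by
  intro ids pair _ hpre
  unfold Spec_replace_pair replace_pair replace_pair_alt
  obtain ⟨m, hm⟩ : ∃ m, PySem.List.max? ids (fun x => x) = some m := by
    cases h : PySem.List.max? ids (fun x => x) with
    | none => exact absurd ((PySem.List.max?_eq_none_iff _ _).mp h) hpre
    | some m => exact ⟨m, rfl⟩
  have hmax : ∀ x ∈ ids, x < m + 1 := fun x hx => by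
    have := PySem.List.max?_isMax hm x hx; omega
  rw [hm]
  simp only [Option.getD_some]
  rw [loopA_eq_pvSpec, foldB_eq_pvSpec pair (m+1) ids [] hmax (by intro h t hh; cases hh)]
  simp
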